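-- pv_equiv track=rewrite | github.com/thisismonica/frog_website_all | Frog/support_frog.py | PassOnStmtAndFailOnStmt
-- ===== SOURCE A (Python) =====
-- def PassOnStmtAndFailOnStmt(B, L ,C ,M, F):
-- 	numStmts = len(M[0])
-- 	numTests = len(M)
-- 	passOnStmt = [0] * numStmts # index by stmt, number of pass cases execute that stmt
-- 	failOnStmt = [0] * numStmts # index by stmt, number of fail cases execute that stmt
--
-- 	# Iterate each test
-- 	for i in range(0,numTests):
-- 		# if test not bad and is live
-- 		if(not B[i] and L[i]):
--
-- 			# iterate each statement
-- 			for j in range(0,numStmts):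
--
-- 				# if statement is coverable and executed by i th test
-- 				if( C[j] and M[i][j] ):
-- 					if F[i]:
-- 						failOnStmt[j] += 1
-- 					else:
-- 						passOnStmt[j] += 1
-- 	return passOnStmt, failOnStmt
-- ===== SOURCE B (Python) =====
-- def PassOnStmtAndFailOnStmt(B, L, C, M, F):
--     numStmts = len(M[0])
--     numTests = len(M)
--     active = [i for i in range(numTests) if not B[i] and L[i]]
--     activePass = [i for i in active if not F[i]]
--     activeFail = [i for i in active if F[i]]
--     passOnStmt = [sum(1 for i in activePass if M[i][j]) if C[j] else 0
--                   for j in range(numStmts)]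
--     failOnStmt = [sum(1 for i in activeFail if M[i][j]) if C[j] else 0
--                   for j in range(numStmts)]
--     return passOnStmt, failOnStmt
-- ===== Notes on version B (the rewrite author's own statement) =====
-- stated objective: alternative
-- what changed: Replaces A's nested per-test/per-statement accumulation into two mutable count arrays by first splitting the tests into activePass/activeFail index lists in one pass, then building each output list directly as a per-statement count over the relevant index list.
-- outside the precondition, e.g. on PassOnStmtAndFailOnStmt([True], [False], [], [[True, True]], []): A returns ([0, 0], [0, 0]), B raises IndexError; on PassOnStmtAndFailOnStmt([False], [True], [False], [[True]], []): A returns ([0], [0]), B raises IndexError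
import Mathlib
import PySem

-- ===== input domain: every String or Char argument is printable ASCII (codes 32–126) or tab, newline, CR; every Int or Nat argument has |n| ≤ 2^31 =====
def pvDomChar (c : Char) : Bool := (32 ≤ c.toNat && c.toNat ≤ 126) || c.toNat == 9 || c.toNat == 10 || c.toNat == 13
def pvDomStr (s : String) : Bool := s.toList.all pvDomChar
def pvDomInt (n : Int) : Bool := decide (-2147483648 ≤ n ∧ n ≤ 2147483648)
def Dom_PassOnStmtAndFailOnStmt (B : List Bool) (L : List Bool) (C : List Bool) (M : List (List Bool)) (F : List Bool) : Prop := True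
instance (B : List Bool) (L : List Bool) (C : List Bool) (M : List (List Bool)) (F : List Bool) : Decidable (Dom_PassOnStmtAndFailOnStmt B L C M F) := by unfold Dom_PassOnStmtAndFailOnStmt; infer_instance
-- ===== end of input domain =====

-- B replaces A's nested accumulation into two mutable count arrays by pre-splitting the
-- tests into activePass/activeFail index lists and building each output entry as a direct
-- count over the relevant index list (same asymptotic cost, different shape).

-- ===== PORT A =====
-- All Python list indices here are nonnegative and in range under Pre_, so reads are ported
-- with List.getD (out of range, where Python raises IndexError, lies outside Pre_).
def PassOnStmtAndFailOnStmt (B : List Bool) (L : List Bool) (C : List Bool) (M : List (List Bool)) (F : List Bool) : List Int × List Int :=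
  let numStmts := (M.getD 0 []).length
  let numTests := M.length
  let init : List Int × List Int := (List.replicate numStmts 0, List.replicate numStmts 0)
  (List.range numTests).foldl (fun st i =>
    if !(B.getD i false) && L.getD i false then
      (List.range numStmts).foldl (fun st j =>
        if C.getD j false && (M.getD i []).getD j false then
          if F.getD i false then (st.1, st.2.set j (st.2.getD j 0 + 1))
          else (st.1.set j (st.1.getD j 0 + 1), st.2)
        else st) st
    else st) init

-- ===== PORT B =====
-- sum(1 for i in xs if cond(i)) is ported as the library count List.countP.
def PassOnStmtAndFailOnStmt_alt (B : List Bool) (L : List Bool) (C : List Bool) (M : List (List Bool)) (F : List Bool) : List Int × List Int :=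
  let numStmts := (M.getD 0 []).length
  let numTests := M.length
  let active := (List.range numTests).filter (fun i => !(B.getD i false) && L.getD i false)
  let activePass := active.filter (fun i => !(F.getD i false))
  let activeFail := active.filter (fun i => F.getD i false)
  let passOnStmt := (List.range numStmts).map (fun j =>
    if C.getD j false then ((activePass.countP (fun i => (M.getD i []).getD j false) : Nat) : Int) else 0)
  let failOnStmt := (List.range numStmts).map (fun j =>
    if C.getD j false then ((activeFail.countP (fun i => (M.getD i []).getD j false) : Nat) : Int) else 0)
  (passOnStmt, failOnStmt)

-- ===== PRECONDITION & SPEC =====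
-- Pre_ is exactly the set of inputs on which BOTH programs return: every index either
-- program reaches is in range.  It excludes the inputs where A raises IndexError, and a few
-- where A returns but B raises: A reads C[j]/F[i] lazily (only once a live test / a covered
-- executed statement is reached) while B reads them eagerly, so short C or F whose
-- out-of-range entries A happens never to reach are excluded.
-- per-test in-range check (Bool-valued so that Pre_ is directly decidable): test i may be
-- read safely — B[i] exists; if the test is not bad, L[i] exists; if it is also live, F[i]
-- exists and every coverable statement index exists in row i.
def pvPreTest (B : List Bool) (L : List Bool) (C : List Bool) (M : List (List Bool)) (F : List Bool) (i : Nat) : Bool :=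
  decide (i < B.length) &&
  (B.getD i false ||
    (decide (i < L.length) &&
      (!(L.getD i false) ||
        (decide (i < F.length) &&
          decide (∀ j, j < (M.getD 0 []).length → C.getD j false = true → j < (M.getD i []).length)))))

def Pre_PassOnStmtAndFailOnStmt (B : List Bool) (L : List Bool) (C : List Bool) (M : List (List Bool)) (F : List Bool) : Prop :=
  M ≠ [] ∧ (M.getD 0 []).length ≤ C.length ∧ ∀ i, i < M.length → pvPreTest B L C M F i = true
instance (B : List Bool) (L : List Bool) (C : List Bool) (M : List (List Bool)) (F : List Bool) : Decidable (Pre_PassOnStmtAndFailOnStmt B L C M F) := by unfold Pre_PassOnStmtAndFailOnStmt; infer_instance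

def pvWitness_PassOnStmtAndFailOnStmt : List Bool × List Bool × List Bool × List (List Bool) × List Bool :=
  ([false], [true], [true], [[true]], [false])

def Spec_PassOnStmtAndFailOnStmt (B : List Bool) (L : List Bool) (C : List Bool) (M : List (List Bool)) (F : List Bool) (out : List Int × List Int) : Prop := out = PassOnStmtAndFailOnStmt_alt B L C M F
instance (B : List Bool) (L : List Bool) (C : List Bool) (M : List (List Bool)) (F : List Bool) (out : List Int × List Int) : Decidable (Spec_PassOnStmtAndFailOnStmt B L C M F out) := by unfold Spec_PassOnStmtAndFailOnStmt; infer_instance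

-- ===== CLAIM (what is proved, stated in full; the proofs are below) =====
def Claim_equal_PassOnStmtAndFailOnStmt : Prop := ∀ (B : List Bool) (L : List Bool) (C : List Bool) (M : List (List Bool)) (F : List Bool), Dom_PassOnStmtAndFailOnStmt B L C M F → Pre_PassOnStmtAndFailOnStmt B L C M F → Spec_PassOnStmtAndFailOnStmt B L C M F (PassOnStmtAndFailOnStmt B L C M F)

-- ===== LEMMAS AND PROOFS =====

-- 'xs[j] += 1 if b' as a single-list operation
def pvAddAt (xs : List Int) (j : Nat) (b : Bool) : List Int :=
  if b then xs.set j (xs.getD j 0 + 1) else xs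

theorem pvAddAt_length (xs : List Int) (j : Nat) (b : Bool) : (pvAddAt xs j b).length = xs.length := by
  unfold pvAddAt; split <;> simp

theorem pvAddAt_getD (xs : List Int) (j : Nat) (b : Bool) (k : Nat) (hk : k < xs.length) :
    (pvAddAt xs j b).getD k 0 = xs.getD k 0 + (if k = j ∧ b = true then 1 else 0) := by
  unfold pvAddAt
  rcases Bool.eq_false_or_eq_true b with hb | hb <;> subst hb <;> simp
  by_cases hkj : k = j
  · subst hkj
    by_cases hj : k < xs.length
    · simp [List.getElem?_set, hj, List.getElem?_eq_getElem hj]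
    · omega
  · simp [List.getElem?_set, hkj, Ne.symm hkj]

-- a fold over a pair whose components do not interact splits into two folds
theorem pvFoldlPair {γ : Type} (f g : List Int → γ → List Int) (l : List γ) (p q : List Int) :
    l.foldl (fun st x => (f st.1 x, g st.2 x)) (p, q) = (l.foldl f p, l.foldl g q) := by
  induction l generalizing p q with
  | nil => rfl
  | cons x xs ih => simpa using ih (f p x) (g q x)

-- A's inner statement loop, one component at a time
theorem pvFoldAddAt_length (pred : Nat → Bool) (p : List Int) (n : Nat) :
    ((List.range n).foldl (fun xs j => pvAddAt xs j (pred j)) p).length = p.length := by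
  induction n with
  | zero => rfl
  | succ m ih => rw [List.range_succ, List.foldl_append]; simpa [pvAddAt_length] using ih

theorem pvFoldAddAt_getD (pred : Nat → Bool) (p : List Int) (n : Nat) (k : Nat) (hk : k < p.length) :
    ((List.range n).foldl (fun xs j => pvAddAt xs j (pred j)) p).getD k 0 =
      p.getD k 0 + (if k < n ∧ pred k = true then 1 else 0) := by
  induction n with
  | zero => simp
  | succ m ih =>
    rw [List.range_succ, List.foldl_append, List.foldl_cons, List.foldl_nil]
    rw [pvAddAt_getD _ _ _ _ (by rw [pvFoldAddAt_length]; exact hk), ih]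
    by_cases hkm : k = m
    · subst hkm
      rcases Bool.eq_false_or_eq_true (pred k) with hb | hb <;> simp [hb]
    · have hiff : k < m + 1 ↔ k < m := by omega
      simp [hkm, hiff]

-- the nested pair-update in A's inner loop, written componentwise
theorem pvInnerSplit (cnd : Nat → Bool) (fl : Bool) :
    (fun (st : List Int × List Int) (j : Nat) =>
        if cnd j then
          if fl then (st.1, st.2.set j (st.2.getD j 0 + 1))
          else (st.1.set j (st.1.getD j 0 + 1), st.2)
        else st)
    = fun st j => (pvAddAt st.1 j (cnd j && !fl), pvAddAt st.2 j (cnd j && fl)) := by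
  funext st j
  rcases hc : cnd j <;> rcases fl <;> simp [pvAddAt, hc]

-- A's whole outer loop splits into two independent single-list loops
theorem pvOuterSplit (gB : Nat → Bool) (a b : Nat → Nat → Bool) (nS : Nat) (l : List Nat) (p q : List Int) :
    l.foldl (fun st i =>
        if gB i then
          (List.range nS).foldl (fun st j => (pvAddAt st.1 j (a i j), pvAddAt st.2 j (b i j))) st
        else st) (p, q)
    = (l.foldl (fun xs i => if gB i then (List.range nS).foldl (fun ys j => pvAddAt ys j (a i j)) xs else xs) p,
       l.foldl (fun xs i => if gB i then (List.range nS).foldl (fun ys j => pvAddAt ys j (b i j)) xs else xs) q) := by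
  induction l generalizing p q with
  | nil => rfl
  | cons i is ih =>
    rw [List.foldl_cons, List.foldl_cons, List.foldl_cons]
    rcases hg : gB i
    · simp only [hg, Bool.false_eq_true, if_false]
      exact ih p q
    · simp only [hg, if_true]
      rw [pvFoldlPair (fun xs j => pvAddAt xs j (a i j)) (fun xs j => pvAddAt xs j (b i j)) (List.range nS) p q]
      exact ih _ _

theorem pvOuter_length (gB : Nat → Bool) (pred : Nat → Nat → Bool) (nS : Nat) (l : List Nat) (p : List Int) :
    (l.foldl (fun xs i => if gB i then (List.range nS).foldl (fun ys j => pvAddAt ys j (pred i j)) xs else xs) p).length = p.length := by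
  induction l generalizing p with
  | nil => rfl
  | cons i is ih =>
    rw [List.foldl_cons]
    rcases hg : gB i
    · simp only [hg, Bool.false_eq_true, if_false]; exact ih p
    · simp only [hg, if_true]
      rw [ih]
      exact pvFoldAddAt_length _ _ _

theorem pvOuter_getD (gB : Nat → Bool) (pred : Nat → Nat → Bool) (nS : Nat) (l : List Nat) (p : List Int) (k : Nat)
    (hp : p.length = nS) (hk : k < nS) :
    (l.foldl (fun xs i => if gB i then (List.range nS).foldl (fun ys j => pvAddAt ys j (pred i j)) xs else xs) p).getD k 0 =
      p.getD k 0 + ((l.countP (fun i => gB i && pred i k) : Nat) : Int) := by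
  induction l generalizing p with
  | nil => simp
  | cons i is ih =>
    rw [List.foldl_cons]
    rcases hg : gB i
    · rw [if_neg (by simp), ih p hp]
      simp [List.countP_cons, hg]
    · rw [if_pos rfl, ih _ (by rw [pvFoldAddAt_length]; exact hp),
        pvFoldAddAt_getD _ _ _ _ (by rw [hp]; exact hk)]
      rcases hpk : pred i k
      · simp [List.countP_cons, hg, hpk]
      · simp [List.countP_cons, hg, hpk, hk]
        push_cast
        ring

-- each component of A's loop, in closed form: a per-statement count over the filtered tests
theorem pvSide (gB c : Nat → Bool) (m : Nat → Nat → Bool) (f2 : Nat → Bool) (nS nT : Nat) :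
    (List.range nT).foldl
        (fun xs i => if gB i then (List.range nS).foldl (fun ys j => pvAddAt ys j (c j && m i j && f2 i)) xs else xs)
        (List.replicate nS 0)
    = (List.range nS).map (fun j =>
        if c j then ((((List.range nT).filter gB |>.filter f2).countP (fun i => m i j) : Nat) : Int) else 0) := by
  apply List.ext_getElem
  · rw [pvOuter_length]; simp
  · intro k hk1 hk2
    have hkS : k < nS := by
      have := hk1; rw [pvOuter_length] at this; simpa using this
    have hA := pvOuter_getD gB (fun i j => c j && m i j && f2 i) nS (List.range nT)
      (List.replicate nS 0) k (by simp) hkS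
    rw [List.getD_eq_getElem _ _ hk1] at hA
    rw [hA]
    simp only [List.getElem_map, List.getElem_range, List.getD_replicate, List.countP_filter, zero_add]
    rcases hc : c k
    · simp
    · simp only [if_true]
      have h0 : (List.replicate nS (0 : Int)).getD k 0 = 0 := by simp
      rw [h0, zero_add, Nat.cast_inj]
      apply List.countP_congr
      intro i _
      rcases hg : gB i <;> rcases hm : m i k <;> rcases hf : f2 i <;> simp [hg, hm, hf]

-- ===== VERDICT (by name: the statement is the Claim_ definition above) =====
theorem PassOnStmtAndFailOnStmt_spec : Claim_equal_PassOnStmtAndFailOnStmt := by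
  intro B L C M F _ _
  unfold Spec_PassOnStmtAndFailOnStmt PassOnStmtAndFailOnStmt PassOnStmtAndFailOnStmt_alt
  simp only [pvInnerSplit]
  rw [pvOuterSplit, pvSide, pvSide]
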